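-- pv_equiv track=rewrite | github.com/aron-lin/seqtrack3d | datasets/misc_utils.py | get_history_frame_ids_and_masks
-- ===== SOURCE A (Python) =====
-- def get_history_frame_ids_and_masks(this_frame_id, hist_num):
--     history_frame_ids = []
--     masks = []
--     for i in range(1, hist_num + 1):
--         frame_id = this_frame_id - i
--         if frame_id < 0:
--             frame_id = 0
--             masks.append(0)
--         else:
--             masks.append(1)
--         history_frame_ids.append(frame_id)
--     return history_frame_ids, masks
-- ===== SOURCE B (Python) =====
-- def get_history_frame_ids_and_masks(this_frame_id, hist_num):
--     valid_count = max(0, min(hist_num, this_frame_id))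
--     ids = [this_frame_id - i for i in range(1, valid_count + 1)]
--     pad = hist_num - valid_count
--     return ids + [0] * pad, [1] * valid_count + [0] * pad
-- ===== Notes on version B (the rewrite author's own statement) =====
-- stated objective: simpler
-- what changed: Replaces the per-element if/else loop by computing the valid/invalid boundary up front (valid_count = clamp) and concatenating two homogeneous segments (a comprehension of real ids plus zero padding).
import Mathlib
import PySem

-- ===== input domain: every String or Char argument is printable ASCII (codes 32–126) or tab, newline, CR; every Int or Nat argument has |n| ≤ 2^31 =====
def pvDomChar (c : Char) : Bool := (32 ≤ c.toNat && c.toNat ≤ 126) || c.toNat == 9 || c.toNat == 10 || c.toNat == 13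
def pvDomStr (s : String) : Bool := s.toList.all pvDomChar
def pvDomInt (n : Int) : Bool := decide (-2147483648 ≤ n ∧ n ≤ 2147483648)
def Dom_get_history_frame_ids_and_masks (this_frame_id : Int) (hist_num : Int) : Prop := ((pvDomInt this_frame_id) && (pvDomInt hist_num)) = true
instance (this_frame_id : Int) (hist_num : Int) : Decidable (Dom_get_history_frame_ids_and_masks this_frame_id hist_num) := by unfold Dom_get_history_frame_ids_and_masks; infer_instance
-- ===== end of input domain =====

-- B computes the valid/invalid boundary up front and builds two homogeneous segments
-- instead of A's per-element if/else loop (objective: simpler decomposition; same cost).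

-- ===== PORT A =====
def get_history_frame_ids_and_masks (this_frame_id : Int) (hist_num : Int) : List Int × List Int :=
  let init : List Int × List Int := ([], [])
  let r := (PySem.List.pyRange 1 (hist_num + 1) 1).foldl
    (fun (st : List Int × List Int) (i : Int) =>
      let frame_id := this_frame_id - i
      if frame_id < 0 then
        (st.1 ++ [0], st.2 ++ [0])
      else
        (st.1 ++ [frame_id], st.2 ++ [1])) init
  r

-- ===== PORT B =====
def get_history_frame_ids_and_masks_alt (this_frame_id : Int) (hist_num : Int) : List Int × List Int :=
  let valid_count : Int := max 0 (min hist_num this_frame_id)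
  let ids : List Int := (PySem.List.pyRange 1 (valid_count + 1) 1).map (fun i => this_frame_id - i)
  let pad : Int := hist_num - valid_count
  (ids ++ List.replicate pad.toNat 0, List.replicate valid_count.toNat 1 ++ List.replicate pad.toNat 0)

-- ===== PRECONDITION & SPEC =====
def Spec_get_history_frame_ids_and_masks (this_frame_id : Int) (hist_num : Int) (out : List Int × List Int) : Prop := out = get_history_frame_ids_and_masks_alt this_frame_id hist_num
instance (this_frame_id : Int) (hist_num : Int) (out : List Int × List Int) : Decidable (Spec_get_history_frame_ids_and_masks this_frame_id hist_num out) := by unfold Spec_get_history_frame_ids_and_masks; infer_instance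

-- ===== CLAIM (what is proved, stated in full; the proofs are below) =====
def Claim_equal_get_history_frame_ids_and_masks : Prop := ∀ (this_frame_id : Int) (hist_num : Int), Dom_get_history_frame_ids_and_masks this_frame_id hist_num → Spec_get_history_frame_ids_and_masks this_frame_id hist_num (get_history_frame_ids_and_masks this_frame_id hist_num)

-- ===== LEMMAS AND PROOFS =====

-- A's loop, characterized as two maps over range n (n = hist_num when nonnegative).
lemma a_char (t : Int) (n : Nat) :
    get_history_frame_ids_and_masks t (n : Int) =
      ((List.range n).map (fun (k : Nat) => if t - ((k : Int) + 1) < 0 then 0 else t - ((k : Int) + 1)),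
       (List.range n).map (fun (k : Nat) => if t - ((k : Int) + 1) < 0 then (0 : Int) else 1)) := by
  induction n with
  | zero =>
    simp [get_history_frame_ids_and_masks]
  | succ m ih =>
    have hcast : ((m + 1 : Nat) : Int) + 1 = ((m : Int) + 1) + 1 := by push_cast; ring
    have hsplit := PySem.List.pyRange_one_succ_right (a := 1) (b := (m : Int) + 1) (by omega)
    simp only [get_history_frame_ids_and_masks] at ih ⊢
    rw [hcast, hsplit, List.foldl_append]
    rw [ih]
    simp [List.range_succ]
    split_ifs with h1 <;> simp_all

-- map over range n with the boundary test equals the two-segment form.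
lemma map_ids_segments (t : Int) (n : Nat) :
    (List.range n).map (fun (k : Nat) => if t - ((k : Int) + 1) < 0 then 0 else t - ((k : Int) + 1)) =
      (PySem.List.pyRange 1 (max 0 (min (n : Int) t) + 1) 1).map (fun i => t - i) ++
        List.replicate ((n : Int) - max 0 (min (n : Int) t)).toNat 0 := by
  set v : Int := max 0 (min (n : Int) t) with hv
  have hv0 : 0 ≤ v := le_max_left _ _
  have hvn : v ≤ (n : Int) := by omega
  rw [PySem.List.pyRange_one]
  have hlen : ((v + 1) - 1).toNat = v.toNat := by omega
  rw [hlen]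
  have hn : n = v.toNat + ((n : Int) - v).toNat := by omega
  rw [hn, List.range_add, List.map_append, List.map_map, List.map_map]
  congr 1
  · apply List.map_congr_left
    intro k hk
    simp only [List.mem_range] at hk
    have : ¬ t - ((k : Int) + 1) < 0 := by omega
    simp [this]
    omega
  · rw [List.eq_replicate_iff]
    constructor
    · simp; omega
    · intro b hb
      simp only [List.mem_map, List.mem_range, Function.comp] at hb
      obtain ⟨k, hk, hbk⟩ := hb
      simp only [Nat.cast_add] at hbk
      rw [if_pos (by omega)] at hbk
      exact hbk.symm

lemma map_masks_segments (t : Int) (n : Nat) :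
    (List.range n).map (fun (k : Nat) => if t - ((k : Int) + 1) < 0 then (0 : Int) else 1) =
      List.replicate (max 0 (min (n : Int) t)).toNat 1 ++
        List.replicate ((n : Int) - max 0 (min (n : Int) t)).toNat 0 := by
  set v : Int := max 0 (min (n : Int) t) with hv
  have hv0 : 0 ≤ v := le_max_left _ _
  have hvn : v ≤ (n : Int) := by omega
  have hn : n = v.toNat + ((n : Int) - v).toNat := by omega
  rw [hn, List.range_add, List.map_append, List.map_map]
  congr 1
  · rw [List.eq_replicate_iff]
    refine ⟨by simp, ?_⟩
    intro b hb
    simp only [List.mem_map, List.mem_range] at hb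
    obtain ⟨k, hk, hbk⟩ := hb
    rw [if_neg (by omega)] at hbk
    exact hbk.symm
  · rw [List.eq_replicate_iff]
    refine ⟨by simp; omega, ?_⟩
    intro b hb
    simp only [List.mem_map, List.mem_range, Function.comp] at hb
    obtain ⟨k, hk, hbk⟩ := hb
    simp only [Nat.cast_add] at hbk
    rw [if_pos (by omega)] at hbk
    exact hbk.symm

lemma equal_nonneg (t : Int) (n : Nat) :
    get_history_frame_ids_and_masks t (n : Int) = get_history_frame_ids_and_masks_alt t (n : Int) := by
  rw [a_char]
  simp only [get_history_frame_ids_and_masks_alt]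
  rw [map_ids_segments, map_masks_segments]

lemma equal_neg (t : Int) (m : Int) (hm : m < 0) :
    get_history_frame_ids_and_masks t m = get_history_frame_ids_and_masks_alt t m := by
  have hv : max 0 (min m t) = 0 := by omega
  have hpad : (m - max 0 (min m t)).toNat = 0 := by omega
  have h1 : m + 1 ≤ 1 := by omega
  simp [get_history_frame_ids_and_masks, get_history_frame_ids_and_masks_alt,
    PySem.List.pyRange_one_eq_nil h1, hv]
  omega

-- ===== VERDICT (by name: the statement is the Claim_ definition above) =====
theorem get_history_frame_ids_and_masks_spec : Claim_equal_get_history_frame_ids_and_masks := by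
  intro t m _
  unfold Spec_get_history_frame_ids_and_masks
  by_cases hm : 0 ≤ m
  · obtain ⟨n, rfl⟩ : ∃ n : Nat, m = (n : Int) := ⟨m.toNat, (Int.toNat_of_nonneg hm).symm⟩
    exact equal_nonneg t n
  · exact equal_neg t m (by omega)
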